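-- pv_equiv track=rewrite | github.com/gms1020/c-bright | instructor_dashboard.py | build_grouped_conflict_lines
-- ===== SOURCE A (Python) =====
-- from collections import defaultdict
--
-- def build_grouped_conflict_lines(result):
--     grouped = defaultdict(int)
--     for conflict in result.get("conflicts", []):
--         key = (
--             conflict.get("student", "Unknown"),
--             conflict.get("conflict_type", "Other"),
--             conflict.get("label", ""),
--         )
--         grouped[key] += 1
--
--     lines = []
--     for (student, conflict_type, label), count in grouped.items():
--         if count > 1:
--             lines.append(f"{student} | {conflict_type} | {label} | Multiple matching entries ({count})")
--         else:
--             lines.append(f"{student} | {conflict_type} | {label}")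
--
--     return sorted(lines)
-- ===== SOURCE B (Python) =====
-- def build_grouped_conflict_lines(result):
--     keys = sorted(
--         (c.get("student", "Unknown"), c.get("conflict_type", "Other"), c.get("label", ""))
--         for c in result.get("conflicts", [])
--     )
--     lines = []
--     i = 0
--     n = len(keys)
--     while i < n:
--         j = i
--         while j < n and keys[j] == keys[i]:
--             j += 1
--         student, conflict_type, label = keys[i]
--         count = j - i
--         if count > 1:
--             lines.append(f"{student} | {conflict_type} | {label} | Multiple matching entries ({count})")
--         else:
--             lines.append(f"{student} | {conflict_type} | {label}")
--         i = j
--     return sorted(lines)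
-- ===== Notes on version B (the rewrite author's own statement) =====
-- stated objective: alternative
-- what changed: Replaces A's defaultdict hash-map counting (then iterating items) with sorting the list of key triples and counting consecutive equal runs with an index scan, groupby-style.
import Mathlib
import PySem

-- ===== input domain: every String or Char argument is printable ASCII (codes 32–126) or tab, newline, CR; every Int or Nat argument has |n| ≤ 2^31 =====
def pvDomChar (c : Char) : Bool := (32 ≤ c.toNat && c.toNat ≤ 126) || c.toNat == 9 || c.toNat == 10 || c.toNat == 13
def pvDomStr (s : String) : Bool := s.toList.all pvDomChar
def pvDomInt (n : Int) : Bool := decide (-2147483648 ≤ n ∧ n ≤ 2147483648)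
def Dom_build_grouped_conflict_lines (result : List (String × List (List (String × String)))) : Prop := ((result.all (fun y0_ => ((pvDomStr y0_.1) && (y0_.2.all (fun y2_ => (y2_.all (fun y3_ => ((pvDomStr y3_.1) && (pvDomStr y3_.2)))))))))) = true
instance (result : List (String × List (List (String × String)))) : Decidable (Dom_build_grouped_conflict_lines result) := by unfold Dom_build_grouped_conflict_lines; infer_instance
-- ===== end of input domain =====

-- B replaces A's hash-map counting with sort-the-key-tuples + count consecutive runs (alternative
-- algorithm of similar cost; return value proved equal).

-- .get(k, default) on a dict-as-association-list: first match (exact under the type convention)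
def pvGet {ν : Type} (l : List (String × ν)) (k : String) (d : ν) : ν :=
  match l.find? (fun p => p.1 == k) with
  | some p => p.2
  | none => d

-- the key triple both Pythons build from one conflict dict
def pvKey (c : List (String × String)) : String × String × String :=
  (pvGet c "student" "Unknown", pvGet c "conflict_type" "Other", pvGet c "label" "")

-- the f-string shared verbatim by both Pythons
def pvFmt (k : String × String × String) (count : Int) : String :=
  if count > 1 then
    k.1 ++ " | " ++ k.2.1 ++ " | " ++ k.2.2 ++ " | Multiple matching entries (" ++ PySem.Int.toStr count ++ ")"
  else
    k.1 ++ " | " ++ k.2.1 ++ " | " ++ k.2.2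

-- ===== PORT A =====
def build_grouped_conflict_lines (result : List (String × List (List (String × String)))) : List String :=
  -- grouped = the defaultdict(int) counting loop; lines = the items loop; return sorted(lines)
  PySem.List.sorted
    ((((pvGet result "conflicts" []).foldl
        (fun d c => PySem.Dict.modify d (pvKey c) 0 (· + 1)) PySem.Dict.empty).items).foldl
      (fun acc kv => acc ++ [pvFmt kv.1 kv.2]) ([] : List String))
    (fun x => x) false

-- ===== PORT B =====
-- Python tuple '<=' (lexicographic) on the key triples
def pvLe3 (p q : String × String × String) : Bool :=
  decide ((toLex (p.1, toLex (p.2.1, p.2.2)) : Lex (String × Lex (String × String)))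
            ≤ toLex (q.1, toLex (q.2.1, q.2.2)))

-- insertion step of sorted(keys)
def pvIns (x : String × String × String) :
    List (String × String × String) → List (String × String × String)
  | [] => [x]
  | y :: ys => if pvLe3 x y then x :: y :: ys else y :: pvIns x ys

-- sorted(keys) under Python's tuple order, as a hand-written insertion sort
def pvSort (l : List (String × String × String)) : List (String × String × String) :=
  l.foldr pvIns []

-- the outer while loop of B: one (key, run length) pair per maximal run of equal keys
def pvGroupRuns : List (String × String × String) → List ((String × String × String) × Int)
  | [] => []
  | x :: xs =>
    (x, 1 + ((xs.takeWhile (fun y => y == x)).length : Int)) ::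
      pvGroupRuns (xs.dropWhile (fun y => y == x))
termination_by l => l.length
decreasing_by
  simp only [List.length_cons]
  exact Nat.lt_succ_of_le (List.length_dropWhile_le _ _)

def build_grouped_conflict_lines_alt (result : List (String × List (List (String × String)))) : List String :=
  -- keys = sorted key triples; the while loops = pvGroupRuns; return sorted(lines)
  PySem.List.sorted
    ((pvGroupRuns (pvSort ((pvGet result "conflicts" []).map pvKey))).foldl
      (fun acc kc => acc ++ [pvFmt kc.1 kc.2]) ([] : List String))
    (fun x => x) false

-- ===== PRECONDITION & SPEC =====
def Spec_build_grouped_conflict_lines (result : List (String × List (List (String × String)))) (out : List String) : Prop := out = build_grouped_conflict_lines_alt result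
instance (result : List (String × List (List (String × String)))) (out : List String) : Decidable (Spec_build_grouped_conflict_lines result out) := by unfold Spec_build_grouped_conflict_lines; infer_instance

-- ===== CLAIM (what is proved, stated in full; the proofs are below) =====
def Claim_equal_build_grouped_conflict_lines : Prop := ∀ (result : List (String × List (List (String × String)))), Dom_build_grouped_conflict_lines result → Spec_build_grouped_conflict_lines result (build_grouped_conflict_lines result)

-- ===== LEMMAS AND PROOFS =====

lemma le3_total (p q : String × String × String) : pvLe3 p q = true ∨ pvLe3 q p = true := by
  simp only [pvLe3, decide_eq_true_eq]
  exact le_total _ _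

lemma le3_trans {p q r : String × String × String}
    (h1 : pvLe3 p q = true) (h2 : pvLe3 q r = true) : pvLe3 p r = true := by
  simp only [pvLe3, decide_eq_true_eq] at *
  exact le_trans h1 h2

lemma le3_antisymm {p q : String × String × String}
    (h1 : pvLe3 p q = true) (h2 : pvLe3 q p = true) : p = q := by
  simp only [pvLe3, decide_eq_true_eq] at *
  have h := le_antisymm h1 h2
  have h' : (p.1, toLex (p.2.1, p.2.2)) = (q.1, toLex (q.2.1, q.2.2)) := toLex.injective h
  have h1 : p.1 = q.1 := congrArg Prod.fst h'
  have h2 : (p.2.1, p.2.2) = (q.2.1, q.2.2) := toLex.injective (congrArg Prod.snd h')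
  have h3 : p.2.1 = q.2.1 := congrArg Prod.fst h2
  have h4 : p.2.2 = q.2.2 := congrArg Prod.snd h2
  exact Prod.ext h1 (Prod.ext h3 h4)

lemma pvIns_perm (x : String × String × String) (l : List (String × String × String)) :
    (pvIns x l).Perm (x :: l) := by
  induction l with
  | nil => simp [pvIns]
  | cons y ys ih =>
    simp only [pvIns]
    split
    · exact List.Perm.refl _
    · exact (List.Perm.cons y ih).trans (List.Perm.swap x y ys)

lemma pvSort_perm (l : List (String × String × String)) : (pvSort l).Perm l := by
  induction l with
  | nil => simp [pvSort]
  | cons x xs ih =>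
    simp only [pvSort, List.foldr_cons] at *
    exact (pvIns_perm x _).trans (List.Perm.cons x ih)

lemma pvIns_pairwise (x : String × String × String) {l : List (String × String × String)}
    (h : l.Pairwise (fun a b => pvLe3 a b = true)) :
    (pvIns x l).Pairwise (fun a b => pvLe3 a b = true) := by
  induction l with
  | nil => simp [pvIns]
  | cons y ys ih =>
    rcases h with _ | ⟨hy, hys⟩
    simp only [pvIns]
    split
    · rename_i hxy
      exact List.Pairwise.cons
        (by
          intro z hz
          rcases List.mem_cons.mp hz with rfl | hz
          · exact hxy
          · exact le3_trans hxy (hy _ hz))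
        (List.Pairwise.cons hy hys)
    · rename_i hxy
      have hyx : pvLe3 y x = true := (le3_total x y).resolve_left (by simpa using hxy)
      refine List.Pairwise.cons ?_ (ih hys)
      intro z hz
      rcases List.mem_cons.mp ((pvIns_perm x ys).mem_iff.mp hz) with rfl | hz
      · exact hyx
      · exact hy _ hz

lemma pvSort_pairwise (l : List (String × String × String)) :
    (pvSort l).Pairwise (fun a b => pvLe3 a b = true) := by
  induction l with
  | nil => simp [pvSort]
  | cons x xs ih => exact pvIns_pairwise x ih

lemma pvDropWhile_head_false {α : Type} (p : α → Bool) (l : List α) (z : α) (zs : List α)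
    (h : l.dropWhile p = z :: zs) : p z = false := by
  induction l with
  | nil => simp [List.dropWhile] at h
  | cons a l ih =>
    rw [List.dropWhile_cons] at h
    split at h
    · exact ih h
    · rename_i ha
      obtain rfl : a = z := (List.cons.injEq _ _ _ _ ▸ h).1
      simpa using ha

lemma pvGroupRuns_spec (l : List (String × String × String))
    (hp : l.Pairwise (fun a b => pvLe3 a b = true)) :
    ((pvGroupRuns l).map Prod.fst).Nodup ∧
      ∀ k c, ((k, c) ∈ pvGroupRuns l ↔ k ∈ l ∧ c = (l.count k : Int)) := by
  induction l using pvGroupRuns.induct with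
  | case1 => simp [pvGroupRuns]
  | case2 x xs ih =>
    obtain ⟨hhead, hxs⟩ := List.pairwise_cons.mp hp
    set run := xs.takeWhile (fun y => y == x) with hrun_def
    set rest := xs.dropWhile (fun y => y == x) with hrest_def
    have hsplit : xs = run ++ rest := (List.takeWhile_append_dropWhile).symm
    have hrun : ∀ y ∈ run, y = x := by
      intro y hy
      have := List.mem_takeWhile_imp hy
      simpa using this
    have hrest_sub : rest.Sublist xs := List.dropWhile_sublist _
    have hp' : rest.Pairwise (fun a b => pvLe3 a b = true) := hxs.sublist hrest_sub
    have hxrest : x ∉ rest := by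
      intro hmem
      cases hrest : rest with
      | nil => rw [hrest] at hmem; simp at hmem
      | cons z zs =>
        have hz : (z == x) = false := pvDropWhile_head_false _ xs z zs (hrest_def ▸ hrest)
        have hzx : z ≠ x := by simpa using hz
        rw [hrest] at hmem
        rcases List.mem_cons.mp hmem with rfl | hmem
        · exact hzx rfl
        · have h1 : pvLe3 x z = true := hhead z (hrest_sub.subset (hrest ▸ List.mem_cons_self))
          have h2 : pvLe3 z x = true := by
            have := List.pairwise_cons.mp (hrest ▸ hp')
            exact this.1 x hmem
          exact hzx (le3_antisymm h2 h1)
    have hcount_run : ∀ k, k ≠ x → run.count k = 0 := by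
      intro k hk
      exact List.count_eq_zero.mpr (fun h => hk (hrun k h))
    have hcount_run_x : run.count x = run.length := by
      rw [List.count_eq_length]
      intro y hy; exact (hrun y hy).symm
    have hcount_rest_x : rest.count x = 0 := List.count_eq_zero.mpr hxrest
    have hcount_x : (x :: xs).count x = 1 + run.length := by
      rw [hsplit, List.count_cons, List.count_append, hcount_run_x, hcount_rest_x]
      simp [Nat.add_comm]
    have hcount_ne : ∀ k, k ≠ x → (x :: xs).count k = rest.count k := by
      intro k hk
      rw [hsplit, List.count_cons, List.count_append, hcount_run k hk]
      simp [Ne.symm hk]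
    obtain ⟨ihnd, ihmem⟩ := ih hp'
    rw [pvGroupRuns]
    constructor
    · rw [List.map_cons]
      refine List.nodup_cons.mpr ⟨?_, ihnd⟩
      intro hx
      obtain ⟨⟨k, c⟩, hpc, hfst⟩ := List.mem_map.mp hx
      cases hfst
      exact hxrest ((ihmem _ _).mp hpc).1
    · intro k c
      rw [List.mem_cons]
      constructor
      · rintro (h | h)
        · obtain ⟨rfl, rfl⟩ : k = x ∧ c = 1 + (run.length : Int) := by
            exact ⟨congrArg Prod.fst h, congrArg Prod.snd h⟩
          refine ⟨List.mem_cons_self, ?_⟩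
          rw [hcount_x]; push_cast; ring
        · obtain ⟨hk_mem, rfl⟩ := (ihmem k c).mp h
          have hkx : k ≠ x := fun h => hxrest (h ▸ hk_mem)
          refine ⟨?_, by rw [hcount_ne k hkx]⟩
          exact List.mem_cons.mpr (Or.inr (hrest_sub.subset hk_mem))
      · rintro ⟨hk_mem, rfl⟩
        by_cases hkx : k = x
        · subst hkx
          left
          refine congrArg (fun n => (k, n)) ?_
          rw [hcount_x, hrun_def]; push_cast; ring
        · right
          refine (ihmem k _).mpr ⟨?_, by rw [hcount_ne k hkx]⟩
          rcases List.mem_cons.mp hk_mem with rfl | hk_mem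
          · exact absurd rfl hkx
          · rw [hsplit] at hk_mem
            rcases List.mem_append.mp hk_mem with h | h
            · exact absurd (hrun k h) hkx
            · exact h

lemma lines_foldl_eq_map (ps : List ((String × String × String) × Int)) :
    ps.foldl (fun acc kv => acc ++ [pvFmt kv.1 kv.2]) ([] : List String)
      = ps.map (fun kv => pvFmt kv.1 kv.2) := by
  have h : ∀ (qs : List ((String × String × String) × Int)) (a : List String),
      qs.foldl (fun acc kv => acc ++ [pvFmt kv.1 kv.2]) a = a ++ qs.map (fun kv => pvFmt kv.1 kv.2) := by
    intro qs
    induction qs with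
    | nil => simp
    | cons q qs ih => intro a; simp [ih]
  simpa using h ps []

-- ===== VERDICT (by name: the statement is the Claim_ definition above) =====
theorem build_grouped_conflict_lines_spec : Claim_equal_build_grouped_conflict_lines := by
  intro result _hdom
  unfold Spec_build_grouped_conflict_lines build_grouped_conflict_lines build_grouped_conflict_lines_alt
  set keys := (pvGet result "conflicts" []).map pvKey with hkeys
  have hA : (pvGet result "conflicts" []).foldl
      (fun d c => PySem.Dict.modify d (pvKey c) 0 (· + 1)) PySem.Dict.empty
      = PySem.Dict.counter keys := by
    rw [PySem.Dict.counter_eq_foldl, hkeys, List.foldl_map]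
  rw [hA, PySem.Dict.items_counter]
  rw [lines_foldl_eq_map, lines_foldl_eq_map]
  set pairsA := (PySem.Set.ofList keys).map (fun k => (k, (keys.count k : Int))) with hpA
  set pairsB := pvGroupRuns (pvSort keys) with hpB
  have hndA : pairsA.Nodup := by
    refine List.Nodup.of_map Prod.fst ?_
    rw [hpA, List.map_map]
    have hid : (Prod.fst ∘ fun k : String × String × String => (k, (keys.count k : Int))) = id := rfl
    rw [hid, List.map_id]
    exact PySem.Set.nodup_ofList keys
  obtain ⟨hndB', hmemB⟩ := pvGroupRuns_spec (pvSort keys) (pvSort_pairwise keys)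
  have hndB : pairsB.Nodup := List.Nodup.of_map Prod.fst hndB'
  have hperm : pairsA.Perm pairsB := by
    rw [List.perm_ext_iff_of_nodup hndA hndB]
    intro a
    constructor
    · intro ha
      obtain ⟨k, hk, rfl⟩ := List.mem_map.mp ha
      refine (hmemB k _).mpr ⟨?_, ?_⟩
      · exact (pvSort_perm keys).mem_iff.mpr ((PySem.Set.mem_ofList _ _).mp hk)
      · rw [(pvSort_perm keys).count_eq]
    · intro ha
      obtain ⟨hk, hc⟩ := (hmemB a.1 a.2).mp ha
      rw [hpA, List.mem_map]
      refine ⟨a.1, ?_, ?_⟩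
      · exact (PySem.Set.mem_ofList _ _).mpr ((pvSort_perm keys).mem_iff.mp hk)
      · rw [← (pvSort_perm keys).count_eq, ← hc]
  exact (PySem.List.sorted_id_eq_sorted_id_iff_perm _ _).mpr (hperm.map _)
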